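-- pv_equiv track=rewrite | github.com/bxduy/PYTHON_PTIT | PY01011.py | check
-- ===== SOURCE A (Python) =====
-- def check(n):
--     m = n
--     cnt = 0
--     s = 0
--     while n > 0:
--         tmp = n % 10
--         if tmp != 0 and tmp != 2 and tmp != 4 and tmp != 6 and tmp != 8:
--             return False
--         cnt += 1
--         s = s * 10 + tmp
--         n //= 10
--     if cnt % 2 != 0:
--         return False
--     if m != s:
--         return False
--     return True
-- ===== SOURCE B (Python) =====
-- def check(n):
--     s = str(n)
--     return len(s) % 2 == 0 and all(c in '02468' for c in s) and s == s[::-1]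
-- ===== Notes on version B (the rewrite author's own statement) =====
-- stated objective: idiomatic
-- what changed: B converts n to its decimal string and tests the three properties on that representation (even length, every character in '02468', s == s[::-1]) instead of A's arithmetic digit-extraction loop that counts digits and rebuilds the reversed number to compare with the input.
-- intended difference: On n = 0, A returns True because its loop never runs and the leftover state (cnt=0, s=0=m) accepts; B returns False since '0' is a one-character (odd-length) string, which is the intended answer for an even-length check. — e.g. on check(0): A returns true, B returns false
import Mathlib
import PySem

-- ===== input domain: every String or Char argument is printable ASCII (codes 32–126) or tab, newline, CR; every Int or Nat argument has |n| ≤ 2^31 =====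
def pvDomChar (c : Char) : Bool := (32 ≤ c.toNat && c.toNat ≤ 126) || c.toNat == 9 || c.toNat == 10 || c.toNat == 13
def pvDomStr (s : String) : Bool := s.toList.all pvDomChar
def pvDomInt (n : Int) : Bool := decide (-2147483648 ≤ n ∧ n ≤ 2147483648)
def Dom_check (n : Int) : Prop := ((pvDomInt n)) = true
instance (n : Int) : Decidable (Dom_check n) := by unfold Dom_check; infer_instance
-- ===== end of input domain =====

-- B tests the property on the decimal STRING of n (even length, chars in '02468',
-- s == s[::-1]) instead of A's arithmetic loop; on n = 0 B intentionally returns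
-- False where A's never-run loop returns True (objective: idiomatic).


-- termination helper for port A's while-loop (n //= 10 with n > 0 shrinks n)
theorem pvFdiv10_toNat_lt {n : Int} (h : 0 < n) :
    (PySem.Int.floordiv n 10).toNat < n.toNat := by
  have h1 : n.fdiv 10 = n / 10 := Int.fdiv_eq_ediv_of_nonneg n (by norm_num)
  have h2 : n / 10 < n := by omega
  have h3 : 0 ≤ n / 10 := Int.ediv_nonneg h.le (by norm_num)
  simp only [PySem.Int.floordiv, h1]
  omega

-- ===== PORT A =====
def checkLoop (m n cnt s : Int) : Bool :=
  if h : 0 < n then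
    let tmp := PySem.Int.mod n 10
    if tmp ≠ 0 ∧ tmp ≠ 2 ∧ tmp ≠ 4 ∧ tmp ≠ 6 ∧ tmp ≠ 8 then false
    else checkLoop m (PySem.Int.floordiv n 10) (cnt + 1) (s * 10 + tmp)
  else if PySem.Int.mod cnt 2 ≠ 0 then false
  else if m ≠ s then false
  else true
termination_by n.toNat
decreasing_by exact pvFdiv10_toNat_lt h

def check (n : Int) : Bool := checkLoop n n 0 0

-- ===== PORT B =====
-- Source B: s = str(n); return len(s) % 2 == 0 and all(c in '02468' for c in s) and s == s[::-1]
-- (s == s[::-1] is string equality with the reversed string, ported via the char list)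
def check_alt (n : Int) : Bool :=
  let s := PySem.Int.toStr n
  decide (PySem.Str.len s % 2 = 0)
    && s.toList.all (fun c => PySem.Chars.isIn [c] "02468".toList)
    && decide (s.toList = s.toList.reverse)

-- ===== PRECONDITION & SPEC =====
-- On n = 0 A returns True (its loop never runs and the leftover state cnt=0, s=0=m
-- accepts), while B returns False because str(0) = '0' has odd length, which is the
-- intended answer for an even-length all-even-digit palindrome check.
def D_check (n : Int) : Prop := n = 0
instance (n : Int) : Decidable (D_check n) := by unfold D_check; infer_instance

def Spec_check (n : Int) (out : Bool) : Prop := ¬ D_check n → out = check_alt n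
instance (n : Int) (out : Bool) : Decidable (Spec_check n out) := by unfold Spec_check; infer_instance

def pvDiffWitness_check : Int := 0
def pvDiffWitnessOut_check : Bool × Bool := (true, false)

-- ===== CLAIM (what is proved, stated in full; the proofs are below) =====
def Claim_unchanged_check : Prop := ∀ (n : Int), Dom_check n → Spec_check n (check n)
def Claim_changed_check : Prop := Dom_check (pvDiffWitness_check) ∧ D_check (pvDiffWitness_check) ∧ check (pvDiffWitness_check) = pvDiffWitnessOut_check.1 ∧ check_alt (pvDiffWitness_check) = pvDiffWitnessOut_check.2 ∧ pvDiffWitnessOut_check.1 ≠ pvDiffWitnessOut_check.2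
def Claim_exact_check : Prop := ∀ (n : Int), Dom_check n → D_check n → check n ≠ check_alt n

-- ===== LEMMAS AND PROOFS =====

-- little-endian digit list of n (n % 10 first), the common reference of both proofs
def digitsB (n : Int) : List Int :=
  if h : 0 < n then PySem.Int.mod n 10 :: digitsB (PySem.Int.floordiv n 10) else []
termination_by n.toNat
decreasing_by exact pvFdiv10_toNat_lt h

-- little-endian value of a digit list
def pvV (l : List Int) : Int := l.foldr (fun d r => d + 10 * r) 0

theorem pvFmodNonneg (a b : Int) (hb : 0 ≤ b) : a.fmod b = a % b := by
  rw [Int.fmod_eq_emod]; simp [hb]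

theorem pvMod2 (c : Int) : PySem.Int.mod c 2 = c % 2 :=
  pvFmodNonneg c 2 (by norm_num)

theorem pvDigitsB_pos {n : Int} (h : 0 < n) :
    digitsB n = n % 10 :: digitsB (n / 10) := by
  rw [digitsB]
  simp [h, PySem.Int.mod, PySem.Int.floordiv,
    pvFmodNonneg n 10 (by norm_num),
    Int.fdiv_eq_ediv_of_nonneg n (by norm_num : (0:Int) ≤ 10)]

theorem pvDigitsB_nonpos {n : Int} (h : ¬ 0 < n) : digitsB n = [] := by
  rw [digitsB]; simp [h]

theorem pvDigits_bounds (n : Int) : ∀ d ∈ digitsB n, 0 ≤ d ∧ d < 10 := by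
  by_cases h : 0 < n
  · rw [pvDigitsB_pos h]
    intro d hd
    rcases List.mem_cons.mp hd with h1 | h1
    · subst h1
      have := Int.emod_nonneg n (by norm_num : (10:Int) ≠ 0)
      have := Int.emod_lt_of_pos n (by norm_num : (0:Int) < 10)
      omega
    · have hlt : (n / 10).toNat < n.toNat := by
        have := pvFdiv10_toNat_lt h
        simpa [PySem.Int.floordiv, Int.fdiv_eq_ediv_of_nonneg n (by norm_num : (0:Int) ≤ 10)] using this
      exact pvDigits_bounds (n / 10) d h1
  · rw [pvDigitsB_nonpos h]; intro d hd; simp at hd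
termination_by n.toNat
decreasing_by exact hlt

theorem pvDigits_val (n : Int) (hn : 0 ≤ n) : pvV (digitsB n) = n := by
  by_cases h : 0 < n
  · rw [pvDigitsB_pos h]
    have hlt : (n / 10).toNat < n.toNat := by
      have := pvFdiv10_toNat_lt h
      simpa [PySem.Int.floordiv, Int.fdiv_eq_ediv_of_nonneg n (by norm_num : (0:Int) ≤ 10)] using this
    have hrec := pvDigits_val (n / 10) (Int.ediv_nonneg hn (by norm_num))
    simp only [pvV, List.foldr] at hrec ⊢
    rw [hrec]; omega
  · rw [pvDigitsB_nonpos h]; simp [pvV]; omega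
termination_by n.toNat
decreasing_by exact hlt

theorem pvV_append_single (l : List Int) (a : Int) :
    pvV (l ++ [a]) = pvV l + a * 10 ^ l.length := by
  induction l with
  | nil => simp [pvV]
  | cons x xs ih =>
    simp only [pvV, List.foldr, List.cons_append, List.length_cons] at ih ⊢
    rw [ih]; ring

theorem pvFoldl_V : ∀ (l : List Int) (s : Int),
    l.foldl (fun s d => s * 10 + d) s = s * 10 ^ l.length + pvV l.reverse := by
  intro l
  induction l with
  | nil => intro s; simp [pvV]
  | cons a xs ih =>
    intro s
    simp only [List.foldl, List.reverse_cons, List.length_cons]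
    rw [ih, pvV_append_single]
    simp only [List.length_reverse]
    ring

theorem pvV_nonneg : ∀ l : List Int, (∀ d ∈ l, 0 ≤ d) → 0 ≤ pvV l := by
  intro l
  induction l with
  | nil => intro _; simp [pvV]
  | cons a xs ih =>
    intro h
    have h1 : 0 ≤ a := h a (by simp)
    have h2 : 0 ≤ pvV xs := ih (fun d hd => h d (by simp [hd]))
    simp only [pvV, List.foldr] at h2 ⊢
    omega

theorem pvV_inj : ∀ l1 l2 : List Int, l1.length = l2.length →
    (∀ d ∈ l1, 0 ≤ d ∧ d < 10) → (∀ d ∈ l2, 0 ≤ d ∧ d < 10) →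
    pvV l1 = pvV l2 → l1 = l2 := by
  intro l1
  induction l1 with
  | nil => intro l2 hlen _ _ _; cases l2 <;> simp_all
  | cons a xs ih =>
    intro l2 hlen hb1 hb2 hv
    cases l2 with
    | nil => simp at hlen
    | cons b ys =>
      have ha := hb1 a (by simp)
      have hbb := hb2 b (by simp)
      have hx : 0 ≤ pvV xs := pvV_nonneg xs (fun d hd => (hb1 d (by simp [hd])).1)
      have hy : 0 ≤ pvV ys := pvV_nonneg ys (fun d hd => (hb2 d (by simp [hd])).1)
      simp only [pvV, List.foldr] at hv
      simp only [pvV] at hx hy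
      have hab : a = b ∧ pvV xs = pvV ys := by
        simp only [pvV]
        constructor <;> omega
      have htail : xs = ys := ih ys (by simpa using hlen)
        (fun d hd => hb1 d (by simp [hd])) (fun d hd => hb2 d (by simp [hd])) hab.2
      simp [hab.1, htail]

theorem pvLoop_eq (m : Int) (n : Int) (hn : 0 ≤ n) (cnt s : Int) :
    checkLoop m n cnt s =
      ((digitsB n).all (fun d => PySem.Int.mod d 2 == 0) &&
       decide ((cnt + (digitsB n).length) % 2 = 0) &&
       decide (m = (digitsB n).foldl (fun s d => s * 10 + d) s)) := by
  by_cases h : 0 < n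
  · have hmod : PySem.Int.mod n 10 = n % 10 :=
      pvFmodNonneg n 10 (by norm_num)
    have hb : 0 ≤ n % 10 ∧ n % 10 < 10 :=
      ⟨Int.emod_nonneg n (by norm_num), Int.emod_lt_of_pos n (by norm_num)⟩
    have hfd : PySem.Int.floordiv n 10 = n / 10 :=
      Int.fdiv_eq_ediv_of_nonneg n (by norm_num)
    have hlt : (n / 10).toNat < n.toNat := by
      have := pvFdiv10_toNat_lt h; rwa [hfd] at this
    rw [checkLoop]
    simp only [h, dif_pos, hmod, hfd, pvDigitsB_pos h]
    by_cases hodd : n % 10 ≠ 0 ∧ n % 10 ≠ 2 ∧ n % 10 ≠ 4 ∧ n % 10 ≠ 6 ∧ n % 10 ≠ 8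
    · have hne : (PySem.Int.mod (n % 10) 2 == 0) = false := by
        rw [pvMod2]; simp; omega
      rw [if_pos hodd]
      simp only [List.all_cons, hne, Bool.false_and]
    · have heven : n % 10 % 2 = 0 := by omega
      have hrec := pvLoop_eq m (n / 10) (Int.ediv_nonneg hn (by norm_num)) (cnt + 1) (s * 10 + n % 10)
      rw [if_neg hodd, hrec]
      have h1 : (PySem.Int.mod (n % 10) 2 == 0) = true := by
        rw [pvMod2]; simp; omega
      simp only [List.all_cons, h1, Bool.true_and, List.length_cons, List.foldl_cons]
      congr 2
      simp only [decide_eq_decide]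
      constructor <;> intro hh <;> [skip; skip] <;> push_cast at hh ⊢ <;> omega
  · rw [checkLoop]
    simp only [h, dif_neg, not_false_iff, pvDigitsB_nonpos h]
    rw [pvMod2]
    simp only [List.all_nil, List.length_nil, List.foldl_nil, Nat.cast_zero, add_zero,
      Bool.true_and]
    split_ifs with h1 h2 <;> simp_all
termination_by n.toNat
decreasing_by exact hlt

-- the digit char of a digit, and its inverse on 0..9
def pvF (d : Int) : Char := Nat.digitChar d.toNat
def pvG (c : Char) : Int := (c.toNat : Int) - 48

theorem pvG_pvF (d : Int) (h0 : 0 ≤ d) (h1 : d < 10) : pvG (pvF d) = d := by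
  interval_cases d <;> decide

theorem pvIsIn_even (d : Int) (h0 : 0 ≤ d) (h1 : d < 10) :
    PySem.Chars.isIn [pvF d] "02468".toList = (PySem.Int.mod d 2 == 0) := by
  interval_cases d <;> decide

-- Nat.toDigitsCore with enough fuel produces the big-endian digit chars of m
theorem pvToDigitsCore : ∀ (f m : Nat) (l : List Char), 0 < m → m < f →
    Nat.toDigitsCore 10 f m l = ((digitsB (m : Int)).map pvF).reverse ++ l := by
  intro f
  induction f with
  | zero => intro m l h0 hf; omega
  | succ f ih =>
    intro m l h0 hf
    have e1 : (↑m : Int) % 10 = ((m % 10 : Nat) : Int) := by omega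
    have e2 : (↑m : Int) / 10 = ((m / 10 : Nat) : Int) := by omega
    have e3 : (((m % 10 : Nat) : Int)).toNat = m % 10 := by omega
    have e3' : ((↑m : Int) % 10).toNat = m % 10 := by omega
    have hds : digitsB (m : Int) = ((m % 10 : Nat) : Int) :: digitsB ((m / 10 : Nat) : Int) := by
      rw [pvDigitsB_pos (by exact_mod_cast h0), e1, e2]
    rw [Nat.toDigitsCore]
    by_cases h10 : m / 10 = 0
    · simp only [h10, if_pos]
      have e4 : digitsB ((0 : Nat) : Int) = [] := by rw [pvDigitsB_nonpos]; norm_num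
      rw [hds, h10, e4]
      simp only [List.map_cons, List.map_nil, List.reverse_cons, List.reverse_nil,
        List.nil_append, List.singleton_append, pvF, e3]
    · rw [if_neg h10]
      have hrec := ih (m / 10) ((m % 10).digitChar :: l) (by omega) (by omega)
      rw [hrec, hds]
      simp [pvF, e3', List.append_assoc]

-- the char list of str(n) for positive n
theorem pvToStr_pos (n : Int) (h : 0 < n) :
    (PySem.Int.toStr n).toList = ((digitsB n).map pvF).reverse := by
  rw [PySem.Int.toList_toStr, PySem.Int.toChars]
  rw [if_neg (by omega)]
  have := pvToDigitsCore (n.toNat + 1) n.toNat [] (by omega) (by omega)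
  rw [Nat.toDigits, this, Int.toNat_of_nonneg h.le, List.append_nil]

theorem pvMapF_palin (ds : List Int) (hb : ∀ d ∈ ds, 0 ≤ d ∧ d < 10) :
    (ds.map pvF = (ds.map pvF).reverse) ↔ (ds = ds.reverse) := by
  have hinv : (ds.map pvF).map pvG = ds := by
    rw [List.map_map]
    have : ∀ d ∈ ds, (pvG ∘ pvF) d = id d := by
      intro d hd
      exact pvG_pvF d (hb d hd).1 (hb d hd).2
    rw [List.map_congr_left this, List.map_id]
  constructor
  · intro h
    have := congrArg (List.map pvG) h
    rwa [hinv, List.map_reverse, hinv] at this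
  · intro h
    conv_lhs => rw [h]
    rw [List.map_reverse]

-- evaluation of both ports at 0 (checkLoop is well-founded, so rewrite, not decide)
theorem pvCheck_zero : check 0 = true := by
  rw [check, checkLoop]
  norm_num [PySem.Int.mod]

theorem pvCheckAlt_zero : check_alt 0 = false := by decide

-- ===== VERDICT (by name: the statements are the Claim_ definitions above) =====
theorem check_spec : Claim_unchanged_check := by
  unfold Claim_unchanged_check Spec_check D_check
  intro n _ hne
  by_cases hn : n < 0
  · -- A: loop skipped, m ≠ s ⇒ False;  B: str(n) starts with '-', which is not in '02468'
    have h1 : ¬ 0 < n := by omega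
    have hchars : (PySem.Int.toStr n).toList = '-' :: Nat.toDigits 10 n.natAbs := by
      rw [PySem.Int.toList_toStr, PySem.Int.toChars, if_pos hn]
    have hminus : PySem.Chars.isIn ['-'] "02468".toList = false := by decide
    have hA : check n = false := by
      rw [check, checkLoop, dif_neg h1, if_neg (by decide), if_pos hne]
    have hB : check_alt n = false := by
      simp only [check_alt, hchars, List.all_cons, hminus]
      simp
    rw [hA, hB]
  · have hpos : 0 < n := by omega
    rw [check, pvLoop_eq n n hpos.le 0 0]
    simp only [check_alt]
    have hbnds := pvDigits_bounds n
    have hval := pvDigits_val n hpos.le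
    have hchars := pvToStr_pos n hpos
    simp only [hchars]
    -- the three components, one by one
    have hlen : decide ((PySem.Str.len (PySem.Int.toStr n)) % 2 = 0)
        = decide ((0 + ((digitsB n).length : Int)) % 2 = 0) := by
      simp only [decide_eq_decide, PySem.Str.len_eq, hchars]
      simp only [List.length_reverse, List.length_map]
      omega
    have hall : (((digitsB n).map pvF).reverse).all
          (fun c => PySem.Chars.isIn [c] "02468".toList)
        = (digitsB n).all (fun d => PySem.Int.mod d 2 == 0) := by
      rw [List.all_reverse, List.all_map, Bool.eq_iff_iff]
      simp only [List.all_eq_true, Function.comp_apply]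
      exact ⟨fun h d hd => by
               rw [← pvIsIn_even d (hbnds d hd).1 (hbnds d hd).2]; exact h d hd,
             fun h d hd => by
               rw [pvIsIn_even d (hbnds d hd).1 (hbnds d hd).2]; exact h d hd⟩
    have hpal : decide (((digitsB n).map pvF).reverse = (((digitsB n).map pvF).reverse).reverse)
        = decide (n = (digitsB n).foldl (fun s d => s * 10 + d) 0) := by
      simp only [decide_eq_decide, List.reverse_reverse]
      constructor
      · intro hh
        have hx : digitsB n = (digitsB n).reverse := (pvMapF_palin _ hbnds).mp hh.symm
        rw [pvFoldl_V]
        simp only [zero_mul, zero_add]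
        rw [← hx, hval]
      · intro hh
        rw [pvFoldl_V] at hh
        simp only [zero_mul, zero_add] at hh
        have h2 : (digitsB n).reverse = digitsB n :=
          pvV_inj _ _ (by simp) (fun d hd => hbnds d (List.mem_reverse.mp hd)) hbnds
            (by rw [← hh, hval])
        exact ((pvMapF_palin _ hbnds).mpr h2.symm).symm
    rw [hlen, hall, hpal]
    congr 1
    exact Bool.and_comm _ _

theorem check_changed : Claim_changed_check := by
  unfold Claim_changed_check
  refine ⟨by decide, by decide, ?_, ?_, by decide⟩
  · exact pvCheck_zero
  · exact pvCheckAlt_zero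

theorem check_tight : Claim_exact_check := by
  unfold Claim_exact_check D_check
  intro n _ hD
  subst hD
  rw [pvCheck_zero, pvCheckAlt_zero]
  decide
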